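-- pv_equiv track=rewrite | github.com/IlyaDyakonov/Prof_Work_Python_HW | HW2/main.py | association
-- ===== SOURCE A (Python) =====
-- def association(contact_list):
--     """объединяем всех с одинаковой фамилией"""
--     contac = {}
--     end_list = [contact_list[0]]
--     for index, cont in enumerate(contact_list[1:]):
--         if cont[0] not in contac.keys():
--             contac[cont[0]] = index + 1
--         else:
--             fix = contact_list[contac[cont[0]]]
--             for i in range(1, 7):
--                 fix[i] = fix[i] or cont[i]
--     for index in contac.values():
--         end_list.append(contact_list[index])
--     return end_list
-- ===== SOURCE B (Python) =====
-- def association(contact_list):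
--     """объединяем всех с одинаковой фамилией"""
--     def merge(a, b):
--         return a[:1] + [a[i] if a[i] else b[i] for i in range(1, 7)] + a[7:]
--
--     result = [contact_list[0]]
--     rows = contact_list[1:]
--     while rows:
--         surname = rows[0][0]
--         merged = rows[0]
--         rest = []
--         for row in rows[1:]:
--             if row[0] == surname:
--                 merged = merge(merged, row)
--             else:
--                 rest.append(row)
--         result.append(merged)
--         rows = rest
--     return result
-- ===== Notes on version B (the rewrite author's own statement) =====
-- stated objective: alternative
-- what changed: B replaces A's single pass with a surname-to-index dictionary plus final gather by repeated group extraction: a while loop that partitions the remaining rows into the leading surname's whole group and the rest, fold-merges that group into one fresh row at once, and repeats on the remainder; rows are rebuilt by slicing instead of mutated in place.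
import Mathlib
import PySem

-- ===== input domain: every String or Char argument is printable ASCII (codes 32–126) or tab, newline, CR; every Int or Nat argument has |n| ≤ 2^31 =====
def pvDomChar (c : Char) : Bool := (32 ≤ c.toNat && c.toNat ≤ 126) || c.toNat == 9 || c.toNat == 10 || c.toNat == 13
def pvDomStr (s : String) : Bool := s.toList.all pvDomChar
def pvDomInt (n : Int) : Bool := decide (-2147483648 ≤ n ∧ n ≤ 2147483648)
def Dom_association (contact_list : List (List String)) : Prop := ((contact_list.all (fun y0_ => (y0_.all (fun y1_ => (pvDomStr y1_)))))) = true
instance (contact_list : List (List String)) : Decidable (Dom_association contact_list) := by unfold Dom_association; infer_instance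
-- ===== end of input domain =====

-- B replaces A's surname→index table and final gather pass by repeated group extraction: it peels off
-- the whole group of the leading surname in one partition pass, fold-merges it into a fresh row, and
-- repeats on the remainder (alternative algorithm; the equivalence proved here is about the RETURN
-- value only — A mutates the rows of its argument in place, B builds new rows and never mutates).


-- ===== PORT A =====
-- Python 'x or y' on strings: y exactly when x is falsy ("")
def pyOrStr (a b : String) : String := if a = "" then b else a

-- for i in range(1, 7): fix[i] = fix[i] or cont[i]   (in-place mutation of the fetched row)
def mergeRowA (fix cont : List String) : List String :=
  (PySem.List.pyRange 1 7 1).foldl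
    (fun f i => PySem.List.pySetD f i (pyOrStr (PySem.List.pyGetD f i "") (PySem.List.pyGetD cont i ""))) fix

-- one iteration of A's first loop; state = (contac, contact_list as mutated so far)
def stepA (st : PySem.Dict String Int × List (List String)) (p : Int × List String) :
    PySem.Dict String Int × List (List String) :=
  let key := PySem.List.pyGetD p.2 0 ""
  if st.1.contains key = false then
    (st.1.insert key (p.1 + 1), st.2)
  else
    let j := st.1.getD key 0
    (st.1, PySem.List.pySetD st.2 j (mergeRowA (PySem.List.pyGetD st.2 j []) p.2))

def association (contact_list : List (List String)) : List (List String) :=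
  let st := (PySem.List.enumerate (PySem.List.slice contact_list (some 1) none) 0).foldl
    stepA (PySem.Dict.empty, contact_list)
  PySem.List.pyGetD contact_list 0 [] :: st.1.values.map (fun j => PySem.List.pyGetD st.2 j [])

-- ===== PORT B =====
-- merge(a, b) = a[:1] + [a[i] if a[i] else b[i] for i in range(1, 7)] + a[7:]
def mergeB (a b : List String) : List String :=
  PySem.List.slice a none (some 1)
    ++ (PySem.List.pyRange 1 7 1).map (fun i =>
          if PySem.List.pyGetD a i "" = "" then PySem.List.pyGetD b i ""
          else PySem.List.pyGetD a i "")
    ++ PySem.List.slice a (some 7) none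

-- body of B's inner partition pass over rows[1:]; state = (merged, rest)
def partStep (s : String) (st : List String × List (List String)) (r : List String) :
    List String × List (List String) :=
  if PySem.List.pyGetD r 0 "" = s then (mergeB st.1 r, st.2) else (st.1, st.2 ++ [r])

-- termination of the while loop: the remainder never grows past the unprocessed rows
lemma partStep_snd_length (s : String) :
    ∀ (l : List (List String)) (a : List String) (out : List (List String)),
      (l.foldl (partStep s) (a, out)).2.length ≤ out.length + l.length := by
  intro l
  induction l with
  | nil => intro a out; simp
  | cons r rest ih =>
    intro a out
    simp only [List.foldl, partStep, List.length_cons]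
    split_ifs
    · have := ih (mergeB a r) out; omega
    · have := ih a (out ++ [r]); simp only [List.length_append, List.length_cons,
        List.length_nil] at this; omega

-- B's while loop: extract the leading surname's whole group, merge it, recurse on the rest
def groupLoop : List (List String) → List (List String)
  | [] => []
  | r0 :: rest =>
    let st := rest.foldl (partStep (PySem.List.pyGetD r0 0 "")) (r0, [])
    st.1 :: groupLoop st.2
termination_by rows => rows.length
decreasing_by
  have h := partStep_snd_length (PySem.List.pyGetD r0 0 "") rest r0 []
  simp only [List.length_nil, Nat.zero_add] at h
  simpa [Nat.lt_succ_iff] using h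

def association_alt (contact_list : List (List String)) : List (List String) :=
  PySem.List.pyGetD contact_list 0 [] :: groupLoop (PySem.List.slice contact_list (some 1) none)

-- ===== PRECONDITION & SPEC =====
-- Pre_ excludes exactly the inputs on which the Python A raises (B raises on the same inputs): the empty
-- list (contact_list[0] → IndexError), an empty row after the header (cont[0] → IndexError), a duplicated
-- surname whose first-occurrence row is shorter than 7 (fix[i] → IndexError), and a duplicate row shorter
-- than 7 on a position i where every same-surname row before it has no i-th field (cont[i] → IndexError).
def Pre_association (contact_list : List (List String)) : Prop :=
  contact_list ≠ [] ∧
  (∀ r ∈ contact_list.tail, r ≠ []) ∧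
  (∀ j, j < contact_list.tail.length →
     (∀ q, q < j → (contact_list.tail.getD q []).headD "" ≠ (contact_list.tail.getD j []).headD "") →
     (∃ k, k < contact_list.tail.length ∧ j < k ∧
        (contact_list.tail.getD k []).headD "" = (contact_list.tail.getD j []).headD "") →
     7 ≤ (contact_list.tail.getD j []).length) ∧
  (∀ k, k < contact_list.tail.length →
     (∃ j, j < k ∧ (contact_list.tail.getD j []).headD "" = (contact_list.tail.getD k []).headD "") →
     ∀ i ∈ ([1, 2, 3, 4, 5, 6] : List Nat), (contact_list.tail.getD k []).length ≤ i →
       ∃ j, j < k ∧ (contact_list.tail.getD j []).headD "" = (contact_list.tail.getD k []).headD "" ∧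
            i < (contact_list.tail.getD j []).length ∧ (contact_list.tail.getD j []).getD i "" ≠ "")
instance (contact_list : List (List String)) : Decidable (Pre_association contact_list) := by
  unfold Pre_association; infer_instance

def pvWitness_association : List (List String) :=
  [["Ivanov", "Ivan", "", "", "123", "", ""], ["Petrov", "", "P", "", "", "7", ""], ["Petrov", "Q", "", "", "9", "", ""]]

def Spec_association (contact_list : List (List String)) (out : List (List String)) : Prop := out = association_alt contact_list
instance (contact_list : List (List String)) (out : List (List String)) : Decidable (Spec_association contact_list out) := by unfold Spec_association; infer_instance

-- ===== CLAIM (what is proved, stated in full; the proofs are below) =====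
def Claim_equal_association : Prop := ∀ (contact_list : List (List String)), Dom_association contact_list → Pre_association contact_list → Spec_association contact_list (association contact_list)

-- ===== LEMMAS AND PROOFS =====

-- surname of a row, as both ports read it
def keyOf (r : List String) : String := r.headD ""

-- left fold of merge over a group (empty group never occurs)
def gfold : List (List String) → List String
  | [] => []
  | f :: gs => gs.foldl mergeB f

-- surnames in order of first occurrence
def firstKeys : List (List String) → List String
  | [] => []
  | r :: rest => keyOf r :: (firstKeys rest).filter (fun s => !(s == keyOf r))

lemma keyOf_eq_pyGetD (r : List String) : PySem.List.pyGetD r 0 "" = keyOf r := by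
  rw [PySem.List.pyGetD_zero]; cases r <;> rfl

lemma mem_firstKeys (s : String) (l : List (List String)) :
    s ∈ firstKeys l ↔ s ∈ l.map keyOf := by
  induction l with
  | nil => simp [firstKeys]
  | cons r rest ih =>
    simp only [firstKeys, List.map_cons, List.mem_cons, List.mem_filter, ih, Bool.not_eq_eq_eq_not,
      Bool.not_true, beq_eq_false_iff_ne, ne_eq]
    by_cases h : s = keyOf r
    · simp [h]
    · simp [h]

lemma firstKeys_append_singleton (l : List (List String)) (r : List String) :
    firstKeys (l ++ [r]) =
      if keyOf r ∈ l.map keyOf then firstKeys l else firstKeys l ++ [keyOf r] := by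
  induction l with
  | nil => simp [firstKeys]
  | cons x l ih =>
    simp only [List.cons_append, firstKeys, ih, List.map_cons]
    by_cases hmem : keyOf r ∈ l.map keyOf
    · rw [if_pos hmem, if_pos (List.mem_cons_of_mem _ hmem)]
    · rw [if_neg hmem]
      by_cases hx : keyOf r = keyOf x
      · rw [if_pos (show keyOf r ∈ keyOf x :: l.map keyOf by simp [hx]), List.filter_append]
        simp [hx]
      · rw [if_neg (by simp [hx, hmem]), List.filter_append]
        simp [hx]

lemma firstKeys_filter_ne (l : List (List String)) (s : String) :
    firstKeys (l.filter (fun r => !(keyOf r == s))) = (firstKeys l).filter (fun t => !(t == s)) := by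
  induction l with
  | nil => simp [firstKeys]
  | cons r rest ih =>
    by_cases h : keyOf r = s
    · rw [List.filter_cons_of_neg (by simp [h]), ih, firstKeys,
        List.filter_cons_of_neg (by simp [h]), List.filter_filter]
      congr 1
      funext t
      rw [h, Bool.and_self]
    · rw [List.filter_cons_of_pos (by simp [h]), firstKeys, ih, firstKeys,
        List.filter_cons_of_pos (by simp [h]), List.filter_filter, List.filter_filter]
      congr 1
      apply List.filter_congr
      intro t _
      rw [Bool.and_comm]

lemma filter_key_filter_ne (l : List (List String)) (s k0 : String) (h : s ≠ k0) :
    (l.filter (fun r => !(keyOf r == k0))).filter (fun r => keyOf r == s)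
      = l.filter (fun r => keyOf r == s) := by
  rw [List.filter_filter]
  congr 1
  funext r
  by_cases hr : keyOf r = s
  · simp [hr, h]
  · simp [hr]

lemma foldl_partStep (s : String) :
    ∀ (l : List (List String)) (a : List String) (out : List (List String)),
      l.foldl (partStep s) (a, out) =
        ((l.filter (fun r => keyOf r == s)).foldl mergeB a,
          out ++ l.filter (fun r => !(keyOf r == s))) := by
  intro l
  induction l with
  | nil => simp
  | cons r rest ih =>
    intro a out
    simp only [List.foldl, partStep, keyOf_eq_pyGetD, List.filter_cons]
    by_cases h : keyOf r = s
    · simp only [h, beq_self_eq_true, Bool.not_true, ih]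
      simp
    · have hb : (keyOf r == s) = false := by simp [h]
      simp only [if_neg h, hb, Bool.not_false, ih]
      simp

lemma groupLoop_eq (l : List (List String)) :
    groupLoop l = (firstKeys l).map (fun s => gfold (l.filter (fun r => keyOf r == s))) := by
  induction hn : l.length using Nat.strong_induction_on generalizing l with
  | _ n ih =>
    cases l with
    | nil => simp [groupLoop, firstKeys]
    | cons r0 rest =>
      have hk : PySem.List.pyGetD r0 0 "" = keyOf r0 := keyOf_eq_pyGetD r0
      rw [groupLoop]
      simp only [hk, foldl_partStep, List.nil_append]
      have hlt : (rest.filter (fun r => !(keyOf r == keyOf r0))).length < n := by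
        have := List.length_filter_le (fun r => !(keyOf r == keyOf r0)) rest
        simp only [← hn, List.length_cons]
        omega
      rw [ih _ hlt _ rfl, firstKeys_filter_ne]
      show _ :: _ = (firstKeys (r0 :: rest)).map _
      rw [firstKeys, List.map_cons]
      congr 1
      · rw [List.filter_cons_of_pos (by simp), gfold]
      · apply List.map_congr_left
        intro s hs
        have hsne : s ≠ keyOf r0 := by
          have := (List.mem_filter.mp hs).2
          simpa using this
        rw [filter_key_filter_ne _ _ _ hsne, List.filter_cons_of_neg (by simp [Ne.symm hsne])]

lemma seven_cons {α : Type} (xs : List α) (h : 7 ≤ xs.length) :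
    ∃ a0 a1 a2 a3 a4 a5 a6 r, xs = a0 :: a1 :: a2 :: a3 :: a4 :: a5 :: a6 :: r := by
  obtain ⟨a0, t, rfl⟩ := List.exists_cons_of_ne_nil (α := α) (l := xs) (by rintro rfl; simp at h)
  simp only [List.length_cons] at h
  obtain ⟨a1, t, rfl⟩ := List.exists_cons_of_ne_nil (α := α) (l := t) (by rintro rfl; simp at h)
  simp only [List.length_cons] at h
  obtain ⟨a2, t, rfl⟩ := List.exists_cons_of_ne_nil (α := α) (l := t) (by rintro rfl; simp at h)
  simp only [List.length_cons] at h
  obtain ⟨a3, t, rfl⟩ := List.exists_cons_of_ne_nil (α := α) (l := t) (by rintro rfl; simp at h)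
  simp only [List.length_cons] at h
  obtain ⟨a4, t, rfl⟩ := List.exists_cons_of_ne_nil (α := α) (l := t) (by rintro rfl; simp at h)
  simp only [List.length_cons] at h
  obtain ⟨a5, t, rfl⟩ := List.exists_cons_of_ne_nil (α := α) (l := t) (by rintro rfl; simp at h)
  simp only [List.length_cons] at h
  obtain ⟨a6, t, rfl⟩ := List.exists_cons_of_ne_nil (α := α) (l := t) (by rintro rfl; simp at h)
  exact ⟨a0, a1, a2, a3, a4, a5, a6, t, rfl⟩

lemma mergeB_explicit (a0 a1 a2 a3 a4 a5 a6 : String) (r : List String) (b : List String) :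
    mergeB (a0::a1::a2::a3::a4::a5::a6::r) b =
      a0 :: pyOrStr a1 (PySem.List.pyGetD b 1 "") :: pyOrStr a2 (PySem.List.pyGetD b 2 "")
        :: pyOrStr a3 (PySem.List.pyGetD b 3 "") :: pyOrStr a4 (PySem.List.pyGetD b 4 "")
        :: pyOrStr a5 (PySem.List.pyGetD b 5 "") :: pyOrStr a6 (PySem.List.pyGetD b 6 "") :: r := by
  have hr : PySem.List.pyRange 1 7 1 = [1, 2, 3, 4, 5, 6] := by decide
  rw [mergeB, hr]
  simp only [List.map_cons, List.map_nil]
  simp [PySem.List.slice, PySem.List.clampIdx, pyOrStr, PySem.List.pyGetD_of_nonneg,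
    -PySem.List.pyGetD_natCast]

lemma mergeRowA_explicit (a0 a1 a2 a3 a4 a5 a6 : String) (r : List String) (b : List String) :
    mergeRowA (a0::a1::a2::a3::a4::a5::a6::r) b =
      a0 :: pyOrStr a1 (PySem.List.pyGetD b 1 "") :: pyOrStr a2 (PySem.List.pyGetD b 2 "")
        :: pyOrStr a3 (PySem.List.pyGetD b 3 "") :: pyOrStr a4 (PySem.List.pyGetD b 4 "")
        :: pyOrStr a5 (PySem.List.pyGetD b 5 "") :: pyOrStr a6 (PySem.List.pyGetD b 6 "") :: r := by
  have hr : PySem.List.pyRange 1 7 1 = [1, 2, 3, 4, 5, 6] := by decide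
  rw [mergeRowA, hr]
  simp only [List.foldl]
  simp [PySem.List.pySetD_of_nonneg, PySem.List.pyGetD_of_nonneg,
    -PySem.List.pySetD_natCast, -PySem.List.pyGetD_natCast]

lemma mergeRowA_eq_mergeB (a b : List String) (h : 7 ≤ a.length) :
    mergeRowA a b = mergeB a b := by
  obtain ⟨a0, a1, a2, a3, a4, a5, a6, r, rfl⟩ := seven_cons a h
  rw [mergeRowA_explicit, mergeB_explicit]

lemma mergeB_length (a b : List String) (h : 7 ≤ a.length) :
    (mergeB a b).length = a.length := by
  obtain ⟨a0, a1, a2, a3, a4, a5, a6, r, rfl⟩ := seven_cons a h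
  rw [mergeB_explicit]; rfl

lemma gfold_cons (f : List String) (gs : List (List String)) :
    gfold (f :: gs) = gs.foldl mergeB f := rfl

lemma foldl_mergeB_length (gs : List (List String)) :
    ∀ f, 7 ≤ f.length → ((gs.foldl mergeB f).length = f.length) := by
  induction gs with
  | nil => intro f _; rfl
  | cons g gs ih =>
    intro f hf
    simp only [List.foldl]
    rw [ih _ (by rw [mergeB_length _ _ hf]; exact hf), mergeB_length _ _ hf]

lemma filter_keyOf_nil (l : List (List String)) (s : String)
    (h : ∀ q, q < l.length → keyOf (l.getD q []) ≠ s) :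
    l.filter (fun r => keyOf r == s) = [] := by
  rw [List.filter_eq_nil_iff]
  intro r hr
  obtain ⟨q, hq, rfl⟩ := List.mem_iff_getElem.mp hr
  have := h q hq
  rw [List.getD_eq_getElem?_getD, List.getElem?_eq_getElem hq] at this
  simpa using this

lemma filter_eq_cons_of_first (l : List (List String)) (s : String) (p : Nat) (hp : p < l.length)
    (hkey : keyOf (l.getD p []) = s) (hfirst : ∀ q, q < p → keyOf (l.getD q []) ≠ s) :
    ∃ gs, l.filter (fun r => keyOf r == s) = (l.getD p []) :: gs := by
  have hgetD : l.getD p [] = l[p] := by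
    rw [List.getD_eq_getElem?_getD, List.getElem?_eq_getElem hp]; rfl
  refine ⟨(l.drop (p + 1)).filter (fun r => keyOf r == s), ?_⟩
  conv_lhs => rw [← List.take_append_drop p l]
  rw [List.filter_append, List.drop_eq_getElem_cons hp,
    List.filter_cons_of_pos (by have h2 : keyOf l[p] = s := hgetD ▸ hkey; simp [h2])]
  have hnil : (l.take p).filter (fun r => keyOf r == s) = [] := by
    apply filter_keyOf_nil
    intro q hq
    have hq' : q < p := lt_of_lt_of_le hq (by rw [List.length_take]; exact Nat.min_le_left _ _)
    have hqd : (l.take p).getD q [] = l.getD q [] := by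
      rw [List.getD_eq_getElem?_getD, List.getD_eq_getElem?_getD, List.getElem?_take_of_lt hq']
    rw [hqd]
    exact hfirst q hq'
  rw [hnil, hgetD]
  simp

lemma getD_mem_take (l : List (List String)) (q m : Nat) (hq : q < m) (hl : q < l.length) :
    l.getD q [] ∈ l.take m := by
  have hq' : q < (l.take m).length := by
    rw [List.length_take]
    omega
  have hmem := List.getElem_mem hq'
  rw [List.getElem_take] at hmem
  rwa [List.getD_eq_getElem?_getD, List.getElem?_eq_getElem hl]

lemma getD_take_eq (l : List (List String)) (q m : Nat) (hq : q < m) :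
    (l.take m).getD q [] = l.getD q [] := by
  rw [List.getD_eq_getElem?_getD, List.getD_eq_getElem?_getD, List.getElem?_take_of_lt hq]

-- loop invariant for A's first loop after processing the first m rows of the tail
def AInv (cl : List (List String)) (m : Int) (d : PySem.Dict String Int)
    (cls : List (List String)) : Prop :=
  d.keys.Nodup ∧
  cls.length = cl.length ∧
  d.items.map Prod.fst = firstKeys (cl.tail.take m.toNat) ∧
  (∀ kv ∈ d.items,
    1 ≤ kv.2 ∧ kv.2 ≤ m ∧
    (kv.2 - 1).toNat < cl.tail.length ∧
    keyOf (cl.tail.getD (kv.2 - 1).toNat []) = kv.1 ∧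
    (∀ q, q < (kv.2 - 1).toNat → keyOf (cl.tail.getD q []) ≠ kv.1) ∧
    PySem.List.pyGetD cls kv.2 [] = gfold ((cl.tail.take m.toNat).filter (fun r => keyOf r == kv.1))) ∧
  (∀ n : Int, 0 ≤ n → (∀ kv ∈ d.items, kv.2 ≠ n) → PySem.List.pyGetD cls n [] = PySem.List.pyGetD cl n [])

lemma loopA (cl : List (List String))
    (hpre7 : ∀ j, j < cl.tail.length →
      (∀ q, q < j → (cl.tail.getD q []).headD "" ≠ (cl.tail.getD j []).headD "") →
      (∃ k, k < cl.tail.length ∧ j < k ∧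
         (cl.tail.getD k []).headD "" = (cl.tail.getD j []).headD "") →
      7 ≤ (cl.tail.getD j []).length) :
    ∀ (t : List (List String)) (m : Int) (d : PySem.Dict String Int) (cls : List (List String)),
      0 ≤ m → cl.tail.drop m.toNat = t → AInv cl m d cls →
      AInv cl (m + t.length)
        (((PySem.List.enumerate t m).foldl stepA (d, cls)).1)
        (((PySem.List.enumerate t m).foldl stepA (d, cls)).2) := by
  intro t
  induction t with
  | nil =>
    intro m d cls hm hdrop hinv
    simpa [PySem.List.enumerate_nil] using hinv
  | cons cont rest ih =>
    intro m d cls hm hdrop hinv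
    obtain ⟨hnd, hlen, hkeys, hent, hfresh⟩ := hinv
    have hmlt : m.toNat < cl.tail.length := by
      rcases lt_or_ge m.toNat cl.tail.length with hlt | hge
      · exact hlt
      · rw [List.drop_eq_nil_of_le hge] at hdrop
        exact absurd hdrop.symm (List.cons_ne_nil _ _)
    have hget : cl.tail[m.toNat] = cont := by
      have h0 : (cl.tail.drop m.toNat)[0]'(by rw [hdrop]; simp) = cont := by
        simp [hdrop]
      rw [List.getElem_drop] at h0
      simpa using h0
    have hgetD : cl.tail.getD m.toNat [] = cont := by
      rw [List.getD_eq_getElem?_getD, List.getElem?_eq_getElem hmlt, hget]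
      rfl
    have hclen : cl.length = cl.tail.length + 1 := by
      cases cl with
      | nil => simp at hmlt
      | cons x xs => simp
    have hdrop' : cl.tail.drop (m + 1).toNat = rest := by
      have h1 : (m + 1).toNat = m.toNat + 1 := by omega
      rw [h1, ← List.drop_drop, hdrop]
      rfl
    have htake1 : cl.tail.take (m + 1).toNat = cl.tail.take m.toNat ++ [cont] := by
      have h1 : (m + 1).toNat = m.toNat + 1 := by omega
      rw [h1, List.take_add_one, List.getElem?_eq_getElem hmlt, hget]
      rfl
    have harith : m + ((cont :: rest).length : Int) = (m + 1) + (rest.length : Int) := by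
      simp only [List.length_cons]
      push_cast
      ring
    rw [harith, PySem.List.enumerate_cons]
    simp only [List.foldl]
    have hk : PySem.List.pyGetD cont 0 "" = keyOf cont := keyOf_eq_pyGetD cont
    by_cases hc : d.contains (keyOf cont) = true
    · -- existing key: merge the current row into the stored first-occurrence row
      obtain ⟨j, hj⟩ : ∃ j, d.get? (keyOf cont) = some j := by
        have hh := PySem.Dict.contains_eq_isSome_get? d (keyOf cont)
        rw [hc] at hh
        exact Option.isSome_iff_exists.mp hh.symm
      have hjmem : (keyOf cont, j) ∈ d.items := PySem.Dict.mem_items_of_get?_eq_some d hj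
      have hjgetD : d.getD (keyOf cont) 0 = j := PySem.Dict.getD_of_get?_eq_some d 0 hj
      obtain ⟨hj1, hjm, hjtl, hjkey, hjfirst, hjrow⟩ := hent _ hjmem
      dsimp only at hj1 hjm hjtl hjkey hjfirst hjrow
      have h7f : 7 ≤ (cl.tail.getD (j - 1).toNat []).length := by
        refine hpre7 (j - 1).toNat hjtl ?_ ?_
        · intro q hq
          have := hjfirst q hq
          rw [show (cl.tail.getD (j - 1).toNat []).headD "" = keyOf (cl.tail.getD (j - 1).toNat []) from rfl, hjkey]
          exact this
        · refine ⟨m.toNat, hmlt, by omega, ?_⟩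
          show keyOf (cl.tail.getD m.toNat []) = keyOf (cl.tail.getD (j - 1).toNat [])
          rw [hgetD, hjkey]
      obtain ⟨gs, hgs⟩ := filter_eq_cons_of_first (cl.tail.take m.toNat) (keyOf cont) (j - 1).toNat
        (by rw [List.length_take]; omega)
        (by rw [getD_take_eq _ _ _ (by omega)]; exact hjkey)
        (fun q hq => by rw [getD_take_eq _ _ _ (by omega)]; exact hjfirst q hq)
      have hgs' : (cl.tail.take m.toNat).filter (fun r => keyOf r == keyOf cont)
          = cl.tail.getD (j - 1).toNat [] :: gs := by
        rw [hgs, getD_take_eq _ _ _ (by omega)]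
      have h7fix : 7 ≤ (PySem.List.pyGetD cls j []).length := by
        rw [hjrow, hgs', gfold_cons, foldl_mergeB_length gs _ h7f]
        exact h7f
      have hstepA : stepA (d, cls) (m, cont)
          = (d, PySem.List.pySetD cls j (mergeRowA (PySem.List.pyGetD cls j []) cont)) := by
        simp only [stepA, hk, hc]
        simp only [Bool.true_eq_false, if_false, hjgetD]
      rw [hstepA]
      have hjlen : j.toNat < cls.length := by omega
      have hcls' : PySem.List.pySetD cls j (mergeRowA (PySem.List.pyGetD cls j []) cont)
          = cls.set j.toNat (mergeRowA (PySem.List.pyGetD cls j []) cont) :=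
        PySem.List.pySetD_of_nonneg _ _ (by omega)
      have hrow_ne : ∀ (n : Int), 0 ≤ n → n ≠ j →
          PySem.List.pyGetD (cls.set j.toNat (mergeRowA (PySem.List.pyGetD cls j []) cont)) n []
            = PySem.List.pyGetD cls n [] := by
        intro n h1 h2
        rw [PySem.List.pyGetD_of_nonneg _ _ h1, List.getD_eq_getElem?_getD,
          List.getElem?_set_ne (by omega), PySem.List.pyGetD_of_nonneg cls _ h1,
          List.getD_eq_getElem?_getD]
      have hrow_j : PySem.List.pyGetD
          (cls.set j.toNat (mergeRowA (PySem.List.pyGetD cls j []) cont)) j []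
            = mergeB (PySem.List.pyGetD cls j []) cont := by
        rw [PySem.List.pyGetD_of_nonneg _ _ (by omega), List.getD_eq_getElem?_getD,
          List.getElem?_set_self hjlen, mergeRowA_eq_mergeB _ _ h7fix]
        rfl
      have hval_ne : ∀ kv ∈ d.items, kv.1 ≠ keyOf cont → kv.2 ≠ j := by
        intro kv hkv hne heq
        obtain ⟨_, _, hkvtl, hkvkey, _, _⟩ := hent kv hkv
        exact hne (by rw [← hkvkey, heq]; exact hjkey)
      have hkv_eq : ∀ kv ∈ d.items, kv.1 = keyOf cont → kv = (keyOf cont, j) := by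
        intro kv hkv hkey1
        have hmem' : (kv.1, kv.2) ∈ d.items := by simpa using hkv
        have hsome := PySem.Dict.get?_of_mem_items (d := d) hmem' hnd
        rw [hkey1, hj] at hsome
        have h2 : j = kv.2 := by injection hsome
        rw [Prod.ext_iff]
        exact ⟨hkey1, h2.symm⟩
      rw [hcls']
      apply ih (m + 1) d _ (by omega) hdrop'
      refine ⟨hnd, by rw [List.length_set]; exact hlen, ?_, ?_, ?_⟩
      · have hmem2 : keyOf cont ∈ (cl.tail.take m.toNat).map keyOf := by
          rw [List.mem_map]
          exact ⟨cl.tail.getD (j - 1).toNat [], getD_mem_take _ _ _ (by omega) (by omega), hjkey⟩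
        rw [htake1, firstKeys_append_singleton, hkeys]
        exact (if_pos hmem2).symm
      · intro kv hkv
        by_cases hkey1 : kv.1 = keyOf cont
        · have hkveq := hkv_eq kv hkv hkey1
          rw [hkveq]
          refine ⟨hj1, by omega, hjtl, hjkey, hjfirst, ?_⟩
          rw [hrow_j, hjrow, htake1, List.filter_append, hgs',
            List.filter_cons_of_pos (by simp), List.filter_nil, List.cons_append,
            gfold_cons, gfold_cons, List.foldl_append]
          rfl
        · obtain ⟨h1, h2, h3, h4, h5, h6⟩ := hent kv hkv
          refine ⟨h1, by omega, h3, h4, h5, ?_⟩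
          rw [hrow_ne kv.2 (by omega) (hval_ne kv hkv hkey1), h6, htake1, List.filter_append,
            List.filter_cons_of_neg (by simp; intro hcc; exact hkey1 hcc.symm), List.filter_nil,
            List.append_nil]
      · intro n hn hnot
        have hnj : n ≠ j := fun heqn => hnot _ hjmem heqn.symm
        rw [hrow_ne n hn hnj]
        exact hfresh n hn hnot
    · -- new key: record it with the current index, the row list is untouched
      rw [Bool.not_eq_true] at hc
      have hnotmem : keyOf cont ∉ (cl.tail.take m.toNat).map keyOf := by
        intro hmem
        have h1 : keyOf cont ∈ d.items.map Prod.fst := by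
          rw [hkeys, mem_firstKeys]
          exact hmem
        have h2 := (PySem.Dict.contains_iff_mem_keys d (keyOf cont)).mpr h1
        rw [hc] at h2
        exact Bool.false_ne_true h2
      have hstepA : stepA (d, cls) (m, cont) = (d.insert (keyOf cont) (m + 1), cls) := by
        simp only [stepA, hk, hc]
        simp
      rw [hstepA]
      have hfreshrow : PySem.List.pyGetD cls (m + 1) [] = cont := by
        rw [hfresh (m + 1) (by omega) (fun kv hkv => by have := (hent kv hkv).2.1; omega)]
        cases cl with
        | nil => simp at hmlt
        | cons c0 tlx =>
          rw [PySem.List.pyGetD_of_nonneg _ _ (by omega),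
            show ((m : Int) + 1).toNat = m.toNat + 1 from by omega, List.getD_cons_succ]
          exact hgetD
      have hitems' := PySem.Dict.items_insert_of_not_contains d ((m : Int) + 1) hc
      apply ih (m + 1) _ cls (by omega) hdrop'
      refine ⟨PySem.Dict.nodup_keys_insert d _ _ hnd, hlen, ?_, ?_, ?_⟩
      · rw [hitems', List.map_append, hkeys, htake1, firstKeys_append_singleton, if_neg hnotmem]
        rfl
      · intro kv hkv
        rw [hitems'] at hkv
        rcases List.mem_append.mp hkv with hold | hnew
        · obtain ⟨h1, h2, h3, h4, h5, h6⟩ := hent kv hold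
          refine ⟨h1, by omega, h3, h4, h5, ?_⟩
          have hkne : keyOf cont ≠ kv.1 := by
            intro heq
            have h7 : kv.1 ∈ d.items.map Prod.fst := List.mem_map_of_mem hold
            have h8 := (PySem.Dict.contains_iff_mem_keys d kv.1).mpr h7
            rw [← heq, hc] at h8
            exact Bool.false_ne_true h8
          rw [h6, htake1, List.filter_append,
            List.filter_cons_of_neg (by simp [hkne]), List.filter_nil, List.append_nil]
        · have hkveq : kv = (keyOf cont, m + 1) := by simpa using hnew
          rw [hkveq]
          dsimp only
          have hm1 : ((m : Int) + 1 - 1).toNat = m.toNat := by omega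
          refine ⟨by omega, by omega, by rw [hm1]; exact hmlt, by rw [hm1]; exact hgetD ▸ rfl, ?_, ?_⟩
          · intro q hq
            rw [hm1] at hq
            intro heq
            apply hnotmem
            rw [← heq]
            exact List.mem_map_of_mem (getD_mem_take _ _ _ hq (by omega))
          · rw [hfreshrow, htake1, List.filter_append,
              filter_keyOf_nil _ _ (fun q hq => by
                rw [getD_take_eq _ _ _ (by rw [List.length_take] at hq; omega)]
                intro heq
                apply hnotmem
                rw [← heq]
                refine List.mem_map_of_mem (getD_mem_take _ _ _ ?_ ?_) <;>
                  rw [List.length_take] at hq <;> omega),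
              List.filter_cons_of_pos (by simp), List.filter_nil, List.nil_append]
            rfl
      · intro n hn hnot
        apply hfresh n hn
        intro kv hkv
        exact hnot kv (by rw [hitems']; exact List.mem_append_left _ hkv)

-- ===== VERDICT (by name: the statement is the Claim_ definition above) =====
theorem association_spec : Claim_equal_association := by
  unfold Claim_equal_association
  intro cl hdom hpre
  obtain ⟨hne, hrow, hpre7, hpre6⟩ := hpre
  unfold Spec_association association association_alt
  simp only [PySem.List.slice_from_one]
  have hinv0 : AInv cl 0 PySem.Dict.empty cl := by
    refine ⟨PySem.Dict.nodup_keys_empty, rfl, ?_, ?_, fun n _ _ => rfl⟩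
    · simp [show (PySem.Dict.empty : PySem.Dict String Int).items = [] from rfl, firstKeys]
    · intro kv hkv
      simp [show (PySem.Dict.empty : PySem.Dict String Int).items = [] from rfl] at hkv
  have h := loopA cl hpre7 cl.tail 0 PySem.Dict.empty cl (le_refl 0) (by simp) hinv0
  obtain ⟨hnd, hlen, hkeys, hent, _⟩ := h
  have htk : ((0 : Int) + (cl.tail.length : Int)).toNat = cl.tail.length := by omega
  rw [htk, List.take_length] at hkeys hent
  rw [groupLoop_eq]
  congr 1
  have hv : (((PySem.List.enumerate cl.tail 0).foldl stepA (PySem.Dict.empty, cl)).1).values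
      = (((PySem.List.enumerate cl.tail 0).foldl stepA (PySem.Dict.empty, cl)).1).items.map
          (fun kv => kv.2) := rfl
  rw [hv, List.map_map, ← hkeys, List.map_map]
  apply List.map_congr_left
  intro kv hkv
  exact (hent kv hkv).2.2.2.2.2
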